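-- pv_equiv track=rewrite | github.com/S3nna13/Aurelius | src/eval/cot_faithfulness.py | extract_cot_steps
-- ===== SOURCE A (Python) =====
-- def extract_cot_steps(text: str, answer_token: str = "Answer:") -> tuple[list[str], str]:  # noqa: S107
--     """Split text into (reasoning_steps, final_answer).
--
--     Split on newlines before answer_token. Returns list of non-empty step strings
--     and the final answer string (everything after the answer_token on that line).
--     If no answer_token is found, returns ([], text) treating the whole text as answer.
--     """
--     lines = text.split("\n")
--     steps: list[str] = []
--     answer = ""
--
--     for i, line in enumerate(lines):
--         if answer_token in line:
--             # Everything before this line is steps; after answer_token is the answer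
--             idx = line.index(answer_token)
--             answer = line[idx + len(answer_token) :].strip()
--             break
--         stripped = line.strip()
--         if stripped:
--             steps.append(stripped)
--
--     return steps, answer
-- ===== SOURCE B (Python) =====
-- def extract_cot_steps(text: str, answer_token: str = "Answer:") -> tuple[list[str], str]:
--     """Locate the answer line first, then build steps and answer in two simple passes."""
--     lines = text.split("\n")
--     idx = next((i for i, line in enumerate(lines) if answer_token in line), None)
--     if idx is None:
--         return [s.strip() for s in lines if s.strip()], ""
--     line = lines[idx]
--     answer = line[line.index(answer_token) + len(answer_token):].strip()
--     return [s.strip() for s in lines[:idx] if s.strip()], answer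
-- ===== Notes on version B (the rewrite author's own statement) =====
-- stated objective: simpler
-- what changed: A interleaves stripping/collecting steps with the token test in one loop that breaks; B first locates the answer line with a single search, then builds the answer and the steps from the prefix with a plain filter+map comprehension.
import Mathlib
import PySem

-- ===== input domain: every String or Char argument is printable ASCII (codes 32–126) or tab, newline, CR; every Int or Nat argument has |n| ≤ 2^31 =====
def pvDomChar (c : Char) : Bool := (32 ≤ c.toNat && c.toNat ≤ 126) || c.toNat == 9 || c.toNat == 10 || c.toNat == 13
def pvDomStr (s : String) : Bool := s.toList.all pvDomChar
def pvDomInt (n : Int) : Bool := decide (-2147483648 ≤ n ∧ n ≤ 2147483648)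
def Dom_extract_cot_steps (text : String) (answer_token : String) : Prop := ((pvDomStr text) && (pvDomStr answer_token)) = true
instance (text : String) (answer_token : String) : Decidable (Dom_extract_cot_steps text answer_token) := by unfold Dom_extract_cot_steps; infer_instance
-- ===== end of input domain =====

-- B locates the answer line once with findIdx? and then builds steps/answer in two
-- simple passes (filter+map over a prefix), instead of A's single interleaved loop
-- with a break; objective: simpler.

-- ===== PORT A =====
-- text.split("\n"): split? is always `some` here since the separator "\n" is nonempty
def pvLinesA (text : String) : List String := (PySem.Str.split? text "\n").getD []

-- A's for-loop with break, as structural recursion over the list of lines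
def pvLoopA (tok : String) : List String → List String × String
  | [] => ([], "")
  | line :: rest =>
    if PySem.Str.isIn tok line then
      -- idx = line.index(answer_token); answer = line[idx+len(tok):].strip(); break
      let idx := PySem.Str.find line tok
      ([], PySem.Str.strip (PySem.Str.slice line (some (idx + PySem.Str.len tok)) none))
    else
      let stripped := PySem.Str.strip line
      let r := pvLoopA tok rest
      if stripped ≠ "" then (stripped :: r.1, r.2) else r

def extract_cot_steps (text : String) (answer_token : String) : List String × String :=
  pvLoopA answer_token (pvLinesA text)

-- ===== PORT B =====
def extract_cot_steps_alt (text : String) (answer_token : String) : List String × String :=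
  let lines := (PySem.Str.split? text "\n").getD []
  match List.findIdx? (fun line => PySem.Str.isIn answer_token line) lines with
  | none =>
      ((lines.filter (fun s => PySem.Str.strip s ≠ "")).map PySem.Str.strip, "")
  | some i =>
      let line := PySem.List.pyGetD lines (i : Int) ""
      let answer := PySem.Str.strip (PySem.Str.slice line
        (some (PySem.Str.find line answer_token + PySem.Str.len answer_token)) none)
      (((PySem.List.slice lines none (some (i : Int))).filter
          (fun s => PySem.Str.strip s ≠ "")).map PySem.Str.strip, answer)

-- ===== PRECONDITION & SPEC =====
def Spec_extract_cot_steps (text : String) (answer_token : String) (out : List String × String) : Prop := out = extract_cot_steps_alt text answer_token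
instance (text : String) (answer_token : String) (out : List String × String) : Decidable (Spec_extract_cot_steps text answer_token out) := by unfold Spec_extract_cot_steps; infer_instance

-- ===== CLAIM (what is proved, stated in full; the proofs are below) =====
def Claim_equal_extract_cot_steps : Prop := ∀ (text : String) (answer_token : String), Dom_extract_cot_steps text answer_token → Spec_extract_cot_steps text answer_token (extract_cot_steps text answer_token)

-- ===== LEMMAS AND PROOFS =====

lemma pvLoop_eq (tok : String) (lines : List String) :
    pvLoopA tok lines =
      match List.findIdx? (fun line => PySem.Str.isIn tok line) lines with
      | none => ((lines.filter (fun s => PySem.Str.strip s ≠ "")).map PySem.Str.strip, "")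
      | some i =>
          (((PySem.List.slice lines none (some (i : Int))).filter
              (fun s => PySem.Str.strip s ≠ "")).map PySem.Str.strip,
           PySem.Str.strip (PySem.Str.slice (PySem.List.pyGetD lines (i : Int) "")
             (some (PySem.Str.find (PySem.List.pyGetD lines (i : Int) "") tok + PySem.Str.len tok)) none)) := by
  induction lines with
  | nil => rfl
  | cons line rest ih =>
    by_cases h : PySem.Str.isIn tok line
    · have h' : PySem.Chars.isIn tok.toList line.toList = true := by simpa using h
      have hz : PySem.List.slice (line :: rest) none (some (0 : Int)) = [] := by
        simp [PySem.List.slice, PySem.List.clampIdx]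
      simp [pvLoopA, h', List.findIdx?_cons, hz]
    · rw [pvLoopA]
      simp only [h, if_neg, Bool.false_eq_true, not_false_iff, List.findIdx?_cons, ih]
      cases hfind : List.findIdx? (fun l => PySem.Str.isIn tok l) rest with
      | none =>
        simp [List.filter_cons]
        split_ifs <;> simp_all
      | some j =>
        simp only [Option.map_some]
        rw [PySem.List.slice_to_natCast, PySem.List.slice_to_natCast,
          PySem.List.pyGetD_natCast, PySem.List.pyGetD_natCast]
        simp [List.filter_cons, List.take_succ_cons]
        split_ifs <;> simp_all

-- ===== VERDICT (by name: the statement is the Claim_ definition above) =====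
theorem extract_cot_steps_spec : Claim_equal_extract_cot_steps := by
  intro text tok _
  show _ = _
  unfold extract_cot_steps extract_cot_steps_alt pvLinesA
  exact pvLoop_eq tok _
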